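-- pv_equiv track=rewrite | github.com/Shark-NLP/OpenICL | scripts/self_consistency.py | processing_answer
-- ===== SOURCE A (Python) =====
-- def processing_answer(str):
--         str = str.split(' ')[::-1]
--         flag = False
--         ret = ''
--         for i in range(len(str)):
--             s = str[i]
--             for i in range(len(s)):
--                 if s[i].isdigit():
--                     flag = True
--                     ret = s
--                     break
--             if flag:
--                 break
--         ret1 = ''
--         for i in range(len(ret)):
--             if ret[i].isdigit():
--                 ret1 += ret[i]
--         return ret1
-- ===== SOURCE B (Python) =====
-- def processing_answer(str):
--     # One character-level pass: no word list is ever built.  'cur' accumulates the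
--     # digits of the word being scanned; at each space boundary, if the word had any
--     # digit, its digits become the current answer 'best'.
--     best = ''
--     cur = ''
--     for c in str:
--         if c == ' ':
--             if cur:
--                 best = cur
--             cur = ''
--         elif c.isdigit():
--             cur += c
--     return cur if cur else best
-- ===== Notes on version B (the rewrite author's own statement) =====
-- stated objective: alternative
-- what changed: B never splits the string into a word list: it makes a single character-level pass with two accumulators (digits of the current word, digits of the last digit-bearing word), replacing A's split/reverse/nested-loop-with-break search and final filtering pass.
import Mathlib
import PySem

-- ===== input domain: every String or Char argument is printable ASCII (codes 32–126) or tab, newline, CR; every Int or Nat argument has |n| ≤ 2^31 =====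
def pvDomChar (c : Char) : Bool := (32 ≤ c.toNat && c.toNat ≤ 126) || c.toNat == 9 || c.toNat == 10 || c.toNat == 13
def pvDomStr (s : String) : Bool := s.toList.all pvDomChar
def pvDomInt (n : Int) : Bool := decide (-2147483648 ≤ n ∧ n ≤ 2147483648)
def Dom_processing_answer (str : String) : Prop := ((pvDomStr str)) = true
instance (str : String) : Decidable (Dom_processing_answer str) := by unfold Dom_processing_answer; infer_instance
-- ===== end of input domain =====

-- B replaces A's split/reverse/nested-loop word search with a single character-level pass that
-- never builds a word list, carrying the current word's digits and the last answer (objective: simpler).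
-- ===== PORT A =====
-- inner 'for i in range(len(s)): if s[i].isdigit(): ... break' — scan for a digit, stop at the first
def pvHasDigitA : List Char → Bool
  | [] => false
  | c :: cs => if PySem.Chars.isdigit c then true else pvHasDigitA cs

-- outer 'for i in range(len(str)): ... if flag: break' — first word (of the reversed list) with a digit, else ret stays ''
def pvFindA : List (List Char) → List Char
  | [] => []
  | s :: rest => if pvHasDigitA s then s else pvFindA rest

-- 'for i in range(len(ret)): if ret[i].isdigit(): ret1 += ret[i]'
def pvDigitsA : List Char → List Char
  | [] => []
  | c :: cs => if PySem.Chars.isdigit c then c :: pvDigitsA cs else pvDigitsA cs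

def processing_answer (str : String) : String :=
  -- str.split(' ')[::-1]; split? is 'some' since the separator " " is nonempty
  let words : List (List Char) := ((PySem.Str.split? str " ").getD []).map String.toList
  let rev : List (List Char) := (PySem.List.slice? words none none (-1)).getD []
  let ret : List Char := pvFindA rev
  String.ofList (pvDigitsA ret)

-- ===== PORT B =====
-- 'for c in str:' with state (best, cur); returns 'cur if cur else best'
def pvStepB (st : List Char × List Char) (c : Char) : List Char × List Char :=
  if c = ' ' then (if st.2 ≠ [] then st.2 else st.1, [])
  else if PySem.Chars.isdigit c then (st.1, st.2 ++ [c]) else st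

def processing_answer_alt (str : String) : String :=
  let fin := str.toList.foldl pvStepB ([], [])
  String.ofList (if fin.2 ≠ [] then fin.2 else fin.1)

-- ===== PRECONDITION & SPEC =====
def Spec_processing_answer (str : String) (out : String) : Prop := out = processing_answer_alt str
instance (str : String) (out : String) : Decidable (Spec_processing_answer str out) := by unfold Spec_processing_answer; infer_instance

-- ===== CLAIM (what is proved, stated in full; the proofs are below) =====
def Claim_equal_processing_answer : Prop := ∀ (str : String), Dom_processing_answer str → Spec_processing_answer str (processing_answer str)

-- ===== LEMMAS AND PROOFS =====

-- split on a single space, as a structural recursion (proof-side model of Python's split(' '))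
def pvSplitSp : List Char → List (List Char)
  | [] => [[]]
  | c :: t =>
    if c = ' ' then [] :: pvSplitSp t
    else match pvSplitSp t with
      | [] => [[c]]
      | w :: ws => (c :: w) :: ws

def pvConsHead (p : List Char) : List (List Char) → List (List Char)
  | [] => [p]
  | w :: ws => (p ++ w) :: ws

theorem pvSplitSp_ne_nil (l : List Char) : pvSplitSp l ≠ [] := by
  cases l with
  | nil => simp [pvSplitSp]
  | cons c t =>
    by_cases h : c = ' '
    · simp [pvSplitSp, h]
    · simp only [pvSplitSp, if_neg h]
      cases pvSplitSp t <;> simp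

theorem pvConsHead_nil (ws : List (List Char)) (h : ws ≠ []) : pvConsHead [] ws = ws := by
  cases ws with
  | nil => exact absurd rfl h
  | cons w ws => simp [pvConsHead]

theorem pvSplitOn_go_spec (fuel : Nat) (l cur : List Char) (acc : List (List Char))
    (h : l.length ≤ fuel) :
    PySem.Chars.splitOn.go [' '] fuel l cur acc
      = acc.reverse ++ pvConsHead cur.reverse (pvSplitSp l) := by
  induction fuel generalizing l cur acc with
  | zero =>
    have : l = [] := List.length_eq_zero_iff.mp (Nat.le_zero.mp h)
    subst this
    simp [PySem.Chars.splitOn.go, pvSplitSp, pvConsHead]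
  | succ f ih =>
    cases l with
    | nil => simp [PySem.Chars.splitOn.go, pvSplitSp, pvConsHead]
    | cons c rest =>
      by_cases hc : c = ' '
      · subst hc
        rw [PySem.Chars.splitOn.go]
        simp only [List.isPrefixOf, beq_self_eq_true, Bool.true_and,
          if_pos, List.length_singleton, List.drop_succ_cons, List.drop_zero]
        rw [ih rest [] (cur.reverse :: acc) (by simpa using Nat.le_of_succ_le_succ (by simpa using h))]
        simp only [List.reverse_nil, pvConsHead_nil _ (pvSplitSp_ne_nil rest)]
        simp [pvSplitSp, pvConsHead]
      · rw [PySem.Chars.splitOn.go]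
        have hpre : [' '].isPrefixOf (c :: rest) = false := by
          simp [List.isPrefixOf]
          exact fun hh => absurd hh.symm hc
        rw [if_neg (by simp [hpre])]
        rw [ih rest (c :: cur) acc (by simpa using Nat.le_of_succ_le_succ (by simpa using h))]
        simp only [pvSplitSp, if_neg hc, List.reverse_cons]
        rcases hne : pvSplitSp rest with _ | ⟨w, ws⟩
        · exact absurd hne (pvSplitSp_ne_nil rest)
        · simp [pvConsHead]

theorem pvSplitOn_space (l : List Char) :
    PySem.Chars.splitOn l [' '] = pvSplitSp l := by
  rw [PySem.Chars.splitOn, pvSplitOn_go_spec (l.length + 1) l [] [] (by omega)]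
  simp [pvConsHead_nil _ (pvSplitSp_ne_nil l)]

-- digits of a word as a filter
theorem pvDigitsA_eq (s : List Char) : pvDigitsA s = s.filter PySem.Chars.isdigit := by
  induction s with
  | nil => rfl
  | cons c cs ih => by_cases h : PySem.Chars.isdigit c <;> simp [pvDigitsA, ih, h]

theorem pvHasDigitA_eq (s : List Char) : pvHasDigitA s = s.any PySem.Chars.isdigit := by
  induction s with
  | nil => rfl
  | cons c cs ih => by_cases h : PySem.Chars.isdigit c <;> simp [pvHasDigitA, h, ih]

-- A's search-then-filter = filter every word, keep first nonempty of the reversed list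
theorem pvFindA_digits (l : List (List Char)) :
    pvDigitsA (pvFindA l)
      = (((l.map (List.filter PySem.Chars.isdigit)).filter (· ≠ [])).head?).getD [] := by
  induction l with
  | nil => rfl
  | cons s rest ih =>
    by_cases h : pvHasDigitA s = true
    · have h' : s.filter PySem.Chars.isdigit ≠ [] := by
        rw [pvHasDigitA_eq] at h
        simp only [ne_eq, List.filter_eq_nil_iff]
        push Not
        rcases List.any_eq_true.mp h with ⟨c, hc, hd⟩
        exact ⟨c, hc, by simp [hd]⟩
      simp [pvFindA, h, pvDigitsA_eq, h']
    · have h' : s.filter PySem.Chars.isdigit = [] := by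
        rw [pvHasDigitA_eq] at h
        simp only [Bool.not_eq_true, List.any_eq_false] at h
        exact List.filter_eq_nil_iff.mpr fun c hc => by simp [h c hc]
      simp [pvFindA, h, ih, h']

-- B's loop over the raw characters, rephrased on the split structure:
-- the list of per-word digit strings, the head pre-seeded with pending digits 'cur'
def pvDigitWords : List Char → List Char → List (List Char)
  | [], cur => [cur]
  | c :: t, cur =>
    if c = ' ' then cur :: pvDigitWords t []
    else if PySem.Chars.isdigit c then pvDigitWords t (cur ++ [c]) else pvDigitWords t cur

def pvLastNE : List (List Char) → List Char → List Char
  | [], b => b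
  | d :: ds, b => pvLastNE ds (if d ≠ [] then d else b)

theorem pvFoldB_eq (l : List Char) (b cur : List Char) :
    (let fin := l.foldl pvStepB (b, cur); if fin.2 ≠ [] then fin.2 else fin.1)
      = pvLastNE (pvDigitWords l cur) b := by
  induction l generalizing b cur with
  | nil => simp [pvDigitWords, pvLastNE]
  | cons c t ih =>
    by_cases hs : c = ' '
    · simp only [List.foldl_cons, pvStepB, pvDigitWords, hs]
      exact ih _ _
    · by_cases hd : PySem.Chars.isdigit c = true
      · simp only [List.foldl_cons, pvStepB, if_neg hs, if_pos hd, pvDigitWords]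
        exact ih _ _
      · simp only [List.foldl_cons, pvStepB, if_neg hs, if_neg hd, pvDigitWords]
        exact ih _ _

theorem pvDigitWords_eq (l : List Char) (cur : List Char) :
    pvDigitWords l cur = pvConsHead cur ((pvSplitSp l).map (List.filter PySem.Chars.isdigit)) := by
  induction l generalizing cur with
  | nil => simp [pvDigitWords, pvSplitSp, pvConsHead]
  | cons c t ih =>
    by_cases hs : c = ' '
    · simp only [pvDigitWords, pvSplitSp, hs]
      rw [ih []]
      have hne : (pvSplitSp t).map (List.filter PySem.Chars.isdigit) ≠ [] := by
        simp [pvSplitSp_ne_nil t]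
      rw [pvConsHead_nil _ hne]
      simp [pvConsHead]
    · rcases hsp : pvSplitSp t with _ | ⟨w, ws⟩
      · exact absurd hsp (pvSplitSp_ne_nil t)
      · by_cases hd : PySem.Chars.isdigit c = true
        · simp only [pvDigitWords, if_neg hs]
          rw [if_pos hd, ih (cur ++ [c]), hsp]
          simp [pvSplitSp, if_neg hs, hsp, pvConsHead, hd]
        · simp only [pvDigitWords, if_neg hs]
          rw [if_neg hd, ih cur, hsp]
          simp [pvSplitSp, if_neg hs, hsp, pvConsHead, hd]

theorem pvLastNE_eq (ds : List (List Char)) (b : List Char) :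
    pvLastNE ds b = (((ds.reverse).filter (· ≠ [])).head?).getD b := by
  induction ds generalizing b with
  | nil => rfl
  | cons d ds ih =>
    simp only [pvLastNE, List.reverse_cons, List.filter_append, List.head?_append, ih]
    by_cases h : d = []
    · simp [h]
    · by_cases h2 : ((ds.reverse).filter (· ≠ [])).head? = none <;>
        cases h3 : ((ds.reverse).filter (· ≠ [])).head? <;> simp_all

-- ===== VERDICT (by name: the statement is the Claim_ definition above) =====
theorem processing_answer_spec : Claim_equal_processing_answer := by
  intro str _
  unfold Spec_processing_answer processing_answer processing_answer_alt
  have hsplit : ((PySem.Str.split? str " ").getD []).map String.toList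
      = pvSplitSp str.toList := by
    have := PySem.Str.split?_map str " "
    rw [show PySem.Chars.split? str.toList " ".toList
          = some (PySem.Chars.splitOn str.toList [' ']) from rfl] at this
    cases hs : PySem.Str.split? str " " with
    | none => rw [hs] at this; exact absurd this (by simp)
    | some ws =>
      rw [hs] at this
      simp only [Option.map_some, Option.some.injEq] at this
      simpa [pvSplitOn_space] using this
  simp only [PySem.List.slice?_none_none_neg_one, Option.getD_some, hsplit]
  rw [pvFindA_digits, pvFoldB_eq, pvDigitWords_eq, pvLastNE_eq]
  have hne : (pvSplitSp str.toList).map (List.filter PySem.Chars.isdigit) ≠ [] := by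
    simp [pvSplitSp_ne_nil str.toList]
  rw [pvConsHead_nil _ hne, ← List.map_reverse]
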